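-- pv_equiv track=rewrite | github.com/RamananVr/Leetcodepython | palindromes_number_theory/2081_unknown_title.py | sum_of_k_mirror_numbers
-- ===== SOURCE A (Python) =====
-- def is_palindrome(s: str) -> bool:
--     """Helper function to check if a string is a palindrome."""
--     return s == s[::-1]
--
-- def is_k_mirror(num: int, k: int) -> bool:
--     """Check if a number is a k-mirror number."""
--     # Check if the number is a palindrome in base-10
--     if not is_palindrome(str(num)):
--         return False
--
--     # Convert the number to base-k and check if it's a palindrome
--     base_k_representation = []
--     temp = num
--     while temp > 0:
--         base_k_representation.append(temp % k)
--         temp //= k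
--     return is_palindrome(''.join(map(str, base_k_representation)))
--
-- def sum_of_k_mirror_numbers(k: int, n: int, m: int) -> int:
--     """
--     Find the sum of the first n k-mirror numbers that are less than or equal to m.
--     """
--     count = 0
--     total_sum = 0
--     num = 1
--
--     while count < n:
--         if num > m:
--             break
--         if is_k_mirror(num, k):
--             total_sum += num
--             count += 1
--         num += 1
--
--     return total_sum
-- ===== SOURCE B (Python) =====
-- def _mirror_onto(num, x):
--     """Append the decimal digits of x (least significant first) to num."""
--     while x > 0:
--         num = num * 10 + x % 10
--         x //= 10
--     return num
--
-- def _base_k_pal(num, k):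
--     digs = []
--     t = num
--     while t > 0:
--         digs.append(t % k)
--         t //= k
--     s = ''.join(map(str, digs))
--     return s == s[::-1]
--
-- def sum_of_k_mirror_numbers(k: int, n: int, m: int) -> int:
--     """Sum of the first n k-mirror numbers that are <= m, found by generating
--     the base-10 palindromes in increasing order from their left half (instead
--     of testing every integer) and keeping those palindromic in base k too."""
--     if n <= 0:
--         return 0
--     total = 0
--     count = 0
--     lo = 1                      # halves with h digits run over [lo, 10*lo)
--     while lo * lo <= m:         # smallest palindrome of this round is lo*lo
--         for odd in (True, False):
--             for half in range(lo, 10 * lo):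
--                 p = _mirror_onto(half, half // 10 if odd else half)
--                 if p > m:
--                     break
--                 if _base_k_pal(p, k):
--                     total += p
--                     count += 1
--                     if count == n:
--                         return total
--         lo *= 10
--     return total
-- ===== Notes on version B (the rewrite author's own statement) =====
-- stated objective: faster
-- what changed: Instead of A's scan that tests every integer 1..m for being a palindrome in base 10 and base k, B constructs the base-10 palindromes directly in increasing order from their left half (odd- then even-length per half width) and tests only those candidates in base k; Pre_ excludes only the inputs (k in {0,1} with n>=1, m>=1) on which Python A raises ZeroDivisionError or loops forever.
import Mathlib
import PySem

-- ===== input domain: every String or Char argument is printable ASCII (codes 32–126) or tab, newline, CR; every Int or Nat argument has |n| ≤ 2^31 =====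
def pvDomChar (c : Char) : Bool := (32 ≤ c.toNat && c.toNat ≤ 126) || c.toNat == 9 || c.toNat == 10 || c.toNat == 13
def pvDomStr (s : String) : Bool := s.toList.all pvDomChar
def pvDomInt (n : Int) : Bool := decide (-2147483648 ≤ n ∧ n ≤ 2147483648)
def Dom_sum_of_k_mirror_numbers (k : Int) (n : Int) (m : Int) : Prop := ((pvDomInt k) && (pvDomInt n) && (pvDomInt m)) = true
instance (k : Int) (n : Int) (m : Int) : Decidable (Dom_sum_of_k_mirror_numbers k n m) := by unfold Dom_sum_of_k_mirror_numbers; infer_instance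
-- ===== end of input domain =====

-- B generates the base-10 palindromes in increasing order from their left half and tests only
-- those in base k, instead of A's scan that tests every integer from 1 up; asymptotically fewer
-- candidates (~sqrt of the scanned range).

-- ===== PORT A =====
-- is_palindrome(s): s == s[::-1]
def pvIsPalindrome (s : String) : Bool :=
  match PySem.Str.slice? s none none (-1) with
  | some r => s == r
  | none => false

-- base_k_representation loop of is_k_mirror: while temp > 0: append temp % k; temp //= k
-- (fuel num.toNat+1 bounds the iteration count of the terminating runs)
def pvDigitsK (k : Int) : Nat → Int → List Int
  | 0, _ => []
  | f + 1, temp =>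
      if temp > 0 then PySem.Int.mod temp k :: pvDigitsK k f (PySem.Int.floordiv temp k) else []

-- is_k_mirror(num, k)
def pvIsKMirror (num k : Int) : Bool :=
  if ¬ pvIsPalindrome (PySem.Int.toStr num) then false
  else pvIsPalindrome (PySem.Str.join "" ((pvDigitsK k (num.toNat + 1) num).map PySem.Int.toStr))

-- the while-loop of sum_of_k_mirror_numbers (fuel m.toNat+1 bounds it: num starts at 1)
def pvLoopA (k n m : Int) : Nat → Int → Int → Int → Int
  | 0, _, _, total => total
  | f + 1, num, count, total =>
      if count < n then
        if num > m then total
        else if pvIsKMirror num k then pvLoopA k n m f (num + 1) (count + 1) (total + num)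
        else pvLoopA k n m f (num + 1) count total
      else total

def sum_of_k_mirror_numbers (k : Int) (n : Int) (m : Int) : Int :=
  pvLoopA k n m (m.toNat + 1) 1 0 0

-- ===== PORT B =====
-- _mirror_onto(num, x): while x > 0: num = num * 10 + x % 10; x //= 10
-- (fuel x.toNat+1 bounds the digit count of the terminating runs)
def pvMirrorOnto : Nat → Int → Int → Int
  | 0, num, _ => num
  | f + 1, num, x =>
      if x > 0 then pvMirrorOnto f (num * 10 + PySem.Int.mod x 10) (PySem.Int.floordiv x 10) else num

-- digit loop of _base_k_pal
def pvDigsB (k : Int) : Nat → Int → List Int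
  | 0, _ => []
  | f + 1, t => if t > 0 then PySem.Int.mod t k :: pvDigsB k f (PySem.Int.floordiv t k) else []

-- _base_k_pal(num, k): s = ''.join(map(str, digs)); s == s[::-1]
def pvBaseKPal (num k : Int) : Bool :=
  let s := PySem.Str.join "" ((pvDigsB k (num.toNat + 1) num).map PySem.Int.toStr)
  match PySem.Str.slice? s none none (-1) with
  | some r => s == r
  | none => false

-- the inner 'for half in range(lo, 10*lo)'; .inl r = the 'return total' fired, .inr = loop ended/broke
def pvInnerB (k n m : Int) (odd : Bool) : List Int → Int → Int → Sum Int (Int × Int)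
  | [], total, count => .inr (total, count)
  | half :: rest, total, count =>
      let p := pvMirrorOnto (half.toNat + 1) half (if odd then PySem.Int.floordiv half 10 else half)
      if p > m then .inr (total, count)
      else if pvBaseKPal p k then
        if count + 1 == n then .inl (total + p)
        else pvInnerB k n m odd rest (total + p) (count + 1)
      else pvInnerB k n m odd rest total count

-- the outer 'while lo * lo <= m' (the two-element 'for odd in (True, False)' is unrolled;
-- fuel m.toNat+2 bounds the number of decuplings of lo)
def pvOuterB (k n m : Int) : Nat → Int → Int → Int → Int
  | 0, _, total, _ => total
  | f + 1, lo, total, count =>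
      if lo * lo ≤ m then
        match pvInnerB k n m true (PySem.List.pyRange lo (10 * lo) 1) total count with
        | .inl r => r
        | .inr (t1, c1) =>
          match pvInnerB k n m false (PySem.List.pyRange lo (10 * lo) 1) t1 c1 with
          | .inl r => r
          | .inr (t2, c2) => pvOuterB k n m f (10 * lo) t2 c2
      else total

def sum_of_k_mirror_numbers_alt (k : Int) (n : Int) (m : Int) : Int :=
  if n ≤ 0 then 0 else pvOuterB k n m (m.toNat + 2) 1 0 0

-- ===== PRECONDITION & SPEC =====
-- Pre_ excludes exactly the inputs on which the Python A does not return: with n ≥ 1 and m ≥ 1 it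
-- reaches the base-k digit loop, which raises ZeroDivisionError for k = 0 and loops forever for k = 1.
def Pre_sum_of_k_mirror_numbers (k : Int) (n : Int) (m : Int) : Prop :=
  (k ≠ 0 ∧ k ≠ 1) ∨ n ≤ 0 ∨ m ≤ 0
instance (k : Int) (n : Int) (m : Int) : Decidable (Pre_sum_of_k_mirror_numbers k n m) := by
  unfold Pre_sum_of_k_mirror_numbers; infer_instance

def pvWitness_sum_of_k_mirror_numbers : Int × Int × Int := (2, 3, 100)

def Spec_sum_of_k_mirror_numbers (k : Int) (n : Int) (m : Int) (out : Int) : Prop := out = sum_of_k_mirror_numbers_alt k n m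
instance (k : Int) (n : Int) (m : Int) (out : Int) : Decidable (Spec_sum_of_k_mirror_numbers k n m out) := by unfold Spec_sum_of_k_mirror_numbers; infer_instance

-- ===== CLAIM (what is proved, stated in full; the proofs are below) =====
def Claim_equal_sum_of_k_mirror_numbers : Prop := ∀ (k : Int) (n : Int) (m : Int), Dom_sum_of_k_mirror_numbers k n m → Pre_sum_of_k_mirror_numbers k n m → Spec_sum_of_k_mirror_numbers k n m (sum_of_k_mirror_numbers k n m)

-- ===== LEMMAS AND PROOFS =====

-- ---------- A-side characterisation ----------

lemma pvIsPalindrome_eq (s : String) : pvIsPalindrome s = decide (s.toList = s.toList.reverse) := by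
  unfold pvIsPalindrome
  rw [PySem.Str.slice?_none_none_neg_one]
  rw [Bool.eq_iff_iff]
  simp only [beq_iff_eq, decide_eq_true_eq]
  constructor
  · intro h; conv_lhs => rw [h]
    simp
  · intro h
    have h2 : String.ofList s.toList = String.ofList s.toList.reverse := by rw [← h]
    simpa using h2

lemma pyRangeNil (a b : Int) (h : b ≤ a) : PySem.List.pyRange a b 1 = [] := by
  apply List.eq_nil_iff_forall_not_mem.mpr
  intro x hx
  rw [PySem.List.mem_pyRange_one] at hx
  omega

-- A's loop computes "total + sum of the first (n - count) k-mirror numbers in [num, m]".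
lemma pvLoopA_eq (k n m : Int) (f : Nat) :
    ∀ (num count total : Int), m - num < (f : Int) →
      pvLoopA k n m f num count total =
        total + ((List.filter (fun x => pvIsKMirror x k) (PySem.List.pyRange num (m + 1) 1)).take (n - count).toNat).sum := by
  induction f with
  | zero =>
      intro num count total hf
      rw [pvLoopA, pyRangeNil _ _ (by omega)]
      simp
  | succ f ih =>
      intro num count total hf
      rw [pvLoopA]
      by_cases hc : count < n
      · simp only [hc, if_pos]
        by_cases hnum : num > m
        · rw [if_pos hnum, pyRangeNil _ _ (by omega)]
          simp
        · rw [if_neg hnum]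
          rw [PySem.List.pyRange_one_cons (by omega : num < m + 1)]
          have htn : (n - count).toNat = (n - (count + 1)).toNat + 1 := by omega
          by_cases hmir : pvIsKMirror num k
          · rw [if_pos hmir, ih _ _ _ (by omega)]
            simp only [List.filter_cons, hmir, if_true, htn, List.take_succ_cons, List.sum_cons]
            ring
          · have hm' : pvIsKMirror num k = false := by simpa using hmir
            rw [if_neg hmir, ih _ _ _ (by omega)]
            simp only [List.filter_cons, hm', Bool.false_eq_true, if_false]
      · simp only [hc, ite_false]
        have : (n - count).toNat = 0 := by omega
        rw [this]
        simp

-- the two base-k digit loops are the same code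
lemma pvDigsB_eq (k : Int) (f : Nat) (t : Int) : pvDigsB k f t = pvDigitsK k f t := by
  induction f generalizing t with
  | zero => rfl
  | succ f ih => simp only [pvDigsB, pvDigitsK, ih]

-- A's test splits into the base-10 test and B's base-k test
lemma pvIsKMirror_split (num k : Int) :
    pvIsKMirror num k = (pvIsPalindrome (PySem.Int.toStr num) && pvBaseKPal num k) := by
  unfold pvIsKMirror pvBaseKPal pvIsPalindrome
  rw [pvDigsB_eq]
  by_cases h : pvIsPalindrome (PySem.Int.toStr num) <;>
    simp [pvIsPalindrome] at h <;> simp [h]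

-- ---------- decimal digits: the base-10 palindrome test as Nat.digits ----------

lemma toDigitsCore_eq_digits (f : Nat) :
    ∀ (x : Nat) (acc : List Char), x < f → 0 < x →
      Nat.toDigitsCore 10 f x acc = ((Nat.digits 10 x).map Nat.digitChar).reverse ++ acc := by
  induction f with
  | zero => intro x acc h; omega
  | succ f ih =>
      intro x acc hf hx
      rw [Nat.toDigitsCore]
      rw [Nat.digits_def' (by omega) hx]
      by_cases h0 : x / 10 = 0
      · simp [h0]
      · rw [if_neg h0]
        rw [ih (x / 10) (Nat.digitChar (x % 10) :: acc) (by omega) (Nat.pos_of_ne_zero h0)]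
        simp

-- str(num) for num ≥ 1, as chars
lemma toChars_pos (x : Int) (hx : 1 ≤ x) :
    PySem.Int.toChars x = ((Nat.digits 10 x.toNat).map Nat.digitChar).reverse := by
  rw [PySem.Int.toChars]
  simp only [if_neg (by omega : ¬ x < 0)]
  rw [Nat.toDigits]
  rw [toDigitsCore_eq_digits _ _ _ (by omega) (by omega)]
  simp

lemma digitChar_inj_lt (a b : Nat) (ha : a < 10) (hb : b < 10) (h : Nat.digitChar a = Nat.digitChar b) : a = b := by
  interval_cases a <;> interval_cases b <;> simp_all [Nat.digitChar]

lemma map_digitChar_inj (l1 l2 : List Nat) (h1 : ∀ d ∈ l1, d < 10) (h2 : ∀ d ∈ l2, d < 10)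
    (h : l1.map Nat.digitChar = l2.map Nat.digitChar) : l1 = l2 := by
  induction l1 generalizing l2 with
  | nil => cases l2 <;> simp_all
  | cons a t ih =>
      cases l2 with
      | nil => simp_all
      | cons b t2 =>
          simp only [List.map_cons, List.cons.injEq] at h
          have := digitChar_inj_lt a b (h1 a (by simp)) (h2 b (by simp)) h.1
          subst this
          have := ih t2 (fun d hd => h1 d (by simp [hd])) (fun d hd => h2 d (by simp [hd])) h.2
          simp [this]

def palB10 (x : Nat) : Bool := decide (Nat.digits 10 x = (Nat.digits 10 x).reverse)

lemma pvIsPal10_eq (x : Int) (hx : 1 ≤ x) :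
    pvIsPalindrome (PySem.Int.toStr x) = palB10 x.toNat := by
  rw [pvIsPalindrome_eq, PySem.Int.toList_toStr, toChars_pos x hx, palB10]
  simp only [List.reverse_reverse, decide_eq_decide]
  rw [← List.map_reverse]
  constructor
  · intro h
    exact (map_digitChar_inj _ _ (fun d hd => Nat.digits_lt_base (by norm_num) (List.mem_reverse.mp hd))
      (fun d hd => Nat.digits_lt_base (by norm_num) hd) h).symm
  · intro h
    conv_rhs => rw [h]

-- ---------- half-to-palindrome construction at the Nat level ----------

def pmir (half y : Nat) : Nat :=
  Nat.ofDigits 10 ((Nat.digits 10 y).reverse) + 10 ^ (Nat.digits 10 y).length * half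

lemma pmir_eq_ofDigits (half y : Nat) :
    pmir half y = Nat.ofDigits 10 ((Nat.digits 10 y).reverse ++ Nat.digits 10 half) := by
  rw [Nat.ofDigits_append, Nat.ofDigits_digits]
  simp [pmir]

lemma digits_pmir (half y : Nat) (hh : half ≠ 0) :
    Nat.digits 10 (pmir half y) = (Nat.digits 10 y).reverse ++ Nat.digits 10 half := by
  rw [pmir_eq_ofDigits]
  apply Nat.digits_ofDigits 10 (by norm_num)
  · intro d hd
    rcases List.mem_append.mp hd with h | h
    · exact Nat.digits_lt_base (by norm_num) (List.mem_reverse.mp h)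
    · exact Nat.digits_lt_base (by norm_num) h
  · intro hne
    rw [List.getLast_append_of_right_ne_nil _ _ (Nat.digits_ne_nil_iff_ne_zero.mpr hh)]
    exact Nat.getLast_digit_ne_zero 10 hh

lemma pal_pmirE (h : Nat) (hh : h ≠ 0) : palB10 (pmir h h) = true := by
  rw [palB10, digits_pmir h h hh]
  simp

lemma pal_pmirO (h : Nat) (hh : h ≠ 0) : palB10 (pmir h (h / 10)) = true := by
  rw [palB10, digits_pmir h (h / 10) hh]
  have hd : Nat.digits 10 h = h % 10 :: Nat.digits 10 (h / 10) :=
    Nat.digits_def' (by norm_num) (Nat.pos_of_ne_zero hh)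
  rw [hd]
  simp

-- length of the digit lists of halves in [10^j, 10^(j+1))
lemma len_digits_of_bounds (j n : Nat) (h1 : 10 ^ j ≤ n) (h2 : n < 10 ^ (j + 1)) :
    (Nat.digits 10 n).length = j + 1 := by
  have hle : (Nat.digits 10 n).length ≤ j + 1 := (Nat.digits_length_le_iff (by norm_num) n).mpr h2
  have hlt : j < (Nat.digits 10 n).length := (Nat.lt_digits_length_iff (by norm_num) n).mpr h1
  omega

lemma len_digits_halfdiv (j half : Nat) (h1 : 10 ^ j ≤ half) (h2 : half < 10 ^ (j + 1)) :
    (Nat.digits 10 (half / 10)).length = j := by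
  have hpos : 0 < half := lt_of_lt_of_le (pow_pos (by norm_num) j) h1
  have hd : Nat.digits 10 half = half % 10 :: Nat.digits 10 (half / 10) :=
    Nat.digits_def' (by norm_num) hpos
  have := len_digits_of_bounds j half h1 h2
  rw [hd] at this
  simpa using this

lemma ofDigits_rev_lt (y : Nat) :
    Nat.ofDigits 10 ((Nat.digits 10 y).reverse) < 10 ^ (Nat.digits 10 y).length := by
  have := Nat.ofDigits_lt_base_pow_length (b := 10) (l := (Nat.digits 10 y).reverse) (by norm_num)
    (fun d hd => Nat.digits_lt_base (by norm_num) (List.mem_reverse.mp hd))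
  simpa using this

lemma pmir_lt (half y s c : Nat) (hs : (Nat.digits 10 y).length = s) (hc : half < 10 ^ c) :
    pmir half y < 10 ^ (s + c) := by
  have hr := ofDigits_rev_lt y
  rw [hs] at hr
  calc pmir half y = Nat.ofDigits 10 ((Nat.digits 10 y).reverse) + 10 ^ (Nat.digits 10 y).length * half := rfl
    _ < 10 ^ s + 10 ^ s * half := by rw [hs]; omega
    _ = 10 ^ s * (half + 1) := by ring
    _ ≤ 10 ^ s * 10 ^ c := by
        have : half + 1 ≤ 10 ^ c := hc
        exact Nat.mul_le_mul_left _ this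
    _ = 10 ^ (s + c) := by rw [pow_add]

lemma pmir_ge (half y s c : Nat) (hs : (Nat.digits 10 y).length = s) (hc : 10 ^ c ≤ half) :
    10 ^ (s + c) ≤ pmir half y := by
  calc (10:Nat) ^ (s + c) = 10 ^ s * 10 ^ c := by rw [pow_add]
    _ ≤ 10 ^ s * half := Nat.mul_le_mul_left _ hc
    _ ≤ pmir half y := by rw [pmir, hs]; omega

lemma pmir_mono (h1 h2 y1 y2 s : Nat) (hs1 : (Nat.digits 10 y1).length = s)
    (hs2 : (Nat.digits 10 y2).length = s) (h : h1 < h2) : pmir h1 y1 < pmir h2 y2 := by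
  have hr := ofDigits_rev_lt y1
  rw [hs1] at hr
  calc pmir h1 y1 < 10 ^ s + 10 ^ s * h1 := by rw [pmir, hs1]; omega
    _ = 10 ^ s * (h1 + 1) := by ring
    _ ≤ 10 ^ s * h2 := Nat.mul_le_mul_left _ h
    _ ≤ pmir h2 y2 := by rw [pmir, hs2]; omega

-- ---------- the generated candidate lists ----------

def blockO (j : Nat) : List Nat := (List.range' (10 ^ j) (9 * 10 ^ j)).map (fun h => pmir h (h / 10))
def blockE (j : Nat) : List Nat := (List.range' (10 ^ j) (9 * 10 ^ j)).map (fun h => pmir h h)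
def cutL (M : Nat) (l : List Nat) : List Nat := l.filter (fun p => decide (p ≤ M))
def restL (M j f : Nat) : List Nat :=
  (List.range' j f).flatMap (fun i => cutL M (blockO i) ++ cutL M (blockE i))
def genL (M J : Nat) : List Nat := restL M 0 J
def palList (M : Nat) : List Nat := (List.range' 1 M).filter palB10

lemma mem_range'_block {j h : Nat} :
    h ∈ List.range' (10 ^ j) (9 * 10 ^ j) ↔ 10 ^ j ≤ h ∧ h < 10 ^ (j + 1) := by
  rw [List.mem_range'_1, pow_succ]
  omega

lemma blockO_mem_facts {j x : Nat} (hx : x ∈ blockO j) :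
    palB10 x = true ∧ 10 ^ (2 * j) ≤ x ∧ x < 10 ^ (2 * j + 1) := by
  rcases List.mem_map.mp hx with ⟨h, hmem, rfl⟩
  rcases mem_range'_block.mp hmem with ⟨h1, h2⟩
  have hp : (0:ℕ) < 10 ^ j := pow_pos (by norm_num) j
  have hh0 : h ≠ 0 := by omega
  have hs : (Nat.digits 10 (h / 10)).length = j := len_digits_halfdiv j h h1 h2
  refine ⟨pal_pmirO h hh0, ?_, ?_⟩
  · have := pmir_ge h (h / 10) j j hs h1
    simpa [two_mul] using this
  · have := pmir_lt h (h / 10) j (j + 1) hs h2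
    have he : j + (j + 1) = 2 * j + 1 := by ring
    rwa [he] at this

lemma blockE_mem_facts {j x : Nat} (hx : x ∈ blockE j) :
    palB10 x = true ∧ 10 ^ (2 * j + 1) ≤ x ∧ x < 10 ^ (2 * j + 2) := by
  rcases List.mem_map.mp hx with ⟨h, hmem, rfl⟩
  rcases mem_range'_block.mp hmem with ⟨h1, h2⟩
  have hp : (0:ℕ) < 10 ^ j := pow_pos (by norm_num) j
  have hh0 : h ≠ 0 := by omega
  have hs : (Nat.digits 10 h).length = j + 1 := len_digits_of_bounds j h h1 h2
  refine ⟨pal_pmirE h hh0, ?_, ?_⟩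
  · have := pmir_ge h h (j + 1) j hs h1
    have he : j + 1 + j = 2 * j + 1 := by ring
    rwa [he] at this
  · have := pmir_lt h h (j + 1) (j + 1) hs h2
    have he : j + 1 + (j + 1) = 2 * j + 2 := by ring
    rwa [he] at this

lemma pairwise_blockO (j : Nat) : (blockO j).Pairwise (· < ·) := by
  unfold blockO
  rw [List.pairwise_map]
  have hp : (List.range' (10 ^ j) (9 * 10 ^ j)).Pairwise (· < ·) := by
    simpa using List.pairwise_lt_range' (s := 10 ^ j) (n := 9 * 10 ^ j)
  refine (List.pairwise_iff_forall_sublist.mpr ?_)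
  intro a b hs
  have ha := mem_range'_block.mp (hs.subset (show a ∈ [a, b] by simp))
  have hb := mem_range'_block.mp (hs.subset (show b ∈ [a, b] by simp))
  have hab : a < b := List.pairwise_iff_forall_sublist.mp hp hs
  exact pmir_mono a b (a / 10) (b / 10) j (len_digits_halfdiv j a ha.1 ha.2)
    (len_digits_halfdiv j b hb.1 hb.2) hab

lemma pairwise_blockE (j : Nat) : (blockE j).Pairwise (· < ·) := by
  unfold blockE
  rw [List.pairwise_map]
  have hp : (List.range' (10 ^ j) (9 * 10 ^ j)).Pairwise (· < ·) := by
    simpa using List.pairwise_lt_range' (s := 10 ^ j) (n := 9 * 10 ^ j)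
  refine (List.pairwise_iff_forall_sublist.mpr ?_)
  intro a b hs
  have ha := mem_range'_block.mp (hs.subset (show a ∈ [a, b] by simp))
  have hb := mem_range'_block.mp (hs.subset (show b ∈ [a, b] by simp))
  have hab : a < b := List.pairwise_iff_forall_sublist.mp hp hs
  exact pmir_mono a b a b (j + 1) (len_digits_of_bounds j a ha.1 ha.2)
    (len_digits_of_bounds j b hb.1 hb.2) hab

lemma cut_mem {M : Nat} {l : List Nat} {x : Nat} (hx : x ∈ cutL M l) : x ∈ l ∧ x ≤ M := by
  have := List.mem_filter.mp hx
  exact ⟨this.1, by simpa using this.2⟩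

lemma restL_mem_facts {M j f x : Nat} (hx : x ∈ restL M j f) :
    palB10 x = true ∧ 1 ≤ x ∧ x ≤ M ∧ 10 ^ (2 * j) ≤ x := by
  rcases List.mem_flatMap.mp hx with ⟨i, hi, hxin⟩
  have hji : j ≤ i := (List.mem_range'_1.mp hi).1
  have hmono : (10:ℕ) ^ (2 * j) ≤ 10 ^ (2 * i) :=
    Nat.pow_le_pow_right (by norm_num) (by omega)
  rcases List.mem_append.mp hxin with h | h
  · obtain ⟨hmem, hle⟩ := cut_mem h
    obtain ⟨hpal, hge, _⟩ := blockO_mem_facts hmem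
    have h1 : (1:ℕ) ≤ 10 ^ (2 * i) := Nat.one_le_pow _ _ (by norm_num)
    exact ⟨hpal, le_trans h1 hge, hle, le_trans hmono hge⟩
  · obtain ⟨hmem, hle⟩ := cut_mem h
    obtain ⟨hpal, hge, _⟩ := blockE_mem_facts hmem
    have h1 : (1:ℕ) ≤ 10 ^ (2 * i + 1) := Nat.one_le_pow _ _ (by norm_num)
    exact ⟨hpal, le_trans h1 hge, hle, le_trans (le_trans hmono (Nat.pow_le_pow_right (by norm_num) (by omega))) hge⟩

lemma pairwise_cut {M : Nat} {l : List Nat} (h : l.Pairwise (· < ·)) : (cutL M l).Pairwise (· < ·) :=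
  h.sublist List.filter_sublist

lemma restL_succ (M j f : Nat) :
    restL M j (f + 1) = (cutL M (blockO j) ++ cutL M (blockE j)) ++ restL M (j + 1) f := by
  rw [restL, List.range'_succ, List.flatMap_cons]
  rfl

lemma pairwise_restL (M j f : Nat) : (restL M j f).Pairwise (· < ·) := by
  induction f generalizing j with
  | zero => simp [restL]
  | succ f ih =>
      rw [restL_succ]
      rw [List.pairwise_append]
      refine ⟨?_, ih (j + 1), ?_⟩
      · rw [List.pairwise_append]
        refine ⟨pairwise_cut (pairwise_blockO j), pairwise_cut (pairwise_blockE j), ?_⟩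
        intro a ha b hb
        have hA := blockO_mem_facts (cut_mem ha).1
        have hB := blockE_mem_facts (cut_mem hb).1
        exact lt_of_lt_of_le hA.2.2 hB.2.1
      · intro a ha b hb
        rcases List.mem_append.mp ha with h | h
        · have hA := blockO_mem_facts (cut_mem h).1
          have hB := (restL_mem_facts hb).2.2.2
          refine lt_of_lt_of_le hA.2.2 (le_trans ?_ hB)
          exact Nat.pow_le_pow_right (by norm_num) (by omega)
        · have hA := blockE_mem_facts (cut_mem h).1
          have hB := (restL_mem_facts hb).2.2.2
          refine lt_of_lt_of_le hA.2.2 (le_trans ?_ hB)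
          exact Nat.pow_le_pow_right (by norm_num) (by omega)

-- every palindrome in [1, M] is generated in its block
lemma mem_genL_of_pal {M J x : Nat} (hx1 : 1 ≤ x) (hx2 : x ≤ M) (hp : palB10 x = true)
    (hJ : M < 10 ^ (2 * J)) : x ∈ genL M J := by
  have hx0 : x ≠ 0 := by omega
  set d := Nat.digits 10 x with hd
  have hpal : d = d.reverse := of_decide_eq_true hp
  have hdne : d ≠ [] := Nat.digits_ne_nil_iff_ne_zero.mpr hx0
  have hL1 : 1 ≤ d.length := List.length_pos_iff.mpr hdne
  set L := d.length with hLdef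
  set j := (L - 1) / 2 with hj
  have hLcases : L = 2 * j + 1 ∨ L = 2 * j + 2 := by omega
  set s := L - (j + 1) with hs
  set half := Nat.ofDigits 10 (d.drop s) with hhalf
  have hdropne : d.drop s ≠ [] := by
    intro hcon
    have := List.drop_eq_nil_iff.mp hcon
    omega
  have hdigh : Nat.digits 10 half = d.drop s := by
    refine Nat.digits_ofDigits 10 (by norm_num) _ (fun l hl => Nat.digits_lt_base (by norm_num) (List.mem_of_mem_drop hl)) (fun hne => ?_)
    rw [List.getLast_drop hne]
    exact Nat.getLast_digit_ne_zero 10 hx0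
  have hlenh : (Nat.digits 10 half).length = j + 1 := by
    rw [hdigh, List.length_drop]
    omega
  have hhb1 : 10 ^ j ≤ half := (Nat.lt_digits_length_iff (by norm_num) half).mp (by omega)
  have hhb2 : half < 10 ^ (j + 1) := (Nat.digits_length_le_iff (by norm_num) half).mp (by omega)
  have hhalf0 : 0 < half := lt_of_lt_of_le (pow_pos (by norm_num) j) hhb1
  have hmemr : half ∈ List.range' (10 ^ j) (9 * 10 ^ j) := mem_range'_block.mpr ⟨hhb1, hhb2⟩
  have hofd : x = Nat.ofDigits 10 (d.take s) + 10 ^ s * half := by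
    conv_lhs => rw [← Nat.ofDigits_digits 10 x, ← hd, ← List.take_append_drop s d]
    rw [Nat.ofDigits_append, List.length_take, Nat.min_eq_left (by omega)]
  -- x lies in block j (odd or even according to the parity of L)
  have hxblock : (L = 2 * j + 1 ∧ x = pmir half (half / 10)) ∨ (L = 2 * j + 2 ∧ x = pmir half half) := by
    rcases hLcases with hL | hL
    · left
      refine ⟨hL, ?_⟩
      have hdight : Nat.digits 10 (half / 10) = d.drop (s + 1) := by
        have := Nat.digits_def' (b := 10) (by norm_num) hhalf0
        rw [hdigh] at this
        have h2 : (d.drop s).tail = Nat.digits 10 (half / 10) := by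
          rw [this]
          rfl
        rw [← h2, List.tail_drop]
      have hlent : (Nat.digits 10 (half / 10)).length = s := by
        rw [hdight, List.length_drop]
        omega
      have htake : d.take s = (Nat.digits 10 (half / 10)).reverse := by
        rw [hdight, List.reverse_drop]
        conv_lhs => rw [hpal]
        congr 1
        omega
      rw [pmir, hlent, ← htake, ← hofd]
    · right
      refine ⟨hL, ?_⟩
      have htake : d.take s = (Nat.digits 10 half).reverse := by
        rw [hdigh, List.reverse_drop]
        conv_lhs => rw [hpal]
        congr 1
        omega
      have hse : s = j + 1 := by omega
      rw [pmir, hlenh, ← htake, ← hse]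
      exact hofd
  have hxge : 10 ^ (2 * j) ≤ x := by
    have : 2 * j ≤ L - 1 := by omega
    calc (10:ℕ) ^ (2 * j) ≤ 10 ^ (L - 1) := Nat.pow_le_pow_right (by norm_num) this
      _ ≤ x := by
          refine (Nat.lt_digits_length_iff (by norm_num) x).mp ?_
          rw [← hd, ← hLdef]
          omega
  have hjJ : j < J := by
    by_contra hcon
    have : (10:ℕ) ^ (2 * J) ≤ 10 ^ (2 * j) := Nat.pow_le_pow_right (by norm_num) (by omega)
    omega
  rw [genL, restL]
  refine List.mem_flatMap.mpr ⟨j, ?_, ?_⟩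
  · rw [List.mem_range'_1]
    omega
  · rcases hxblock with ⟨_, hx⟩ | ⟨_, hx⟩
    · refine List.mem_append_left _ (List.mem_filter.mpr ⟨?_, by simpa using hx2⟩)
      exact hx ▸ List.mem_map.mpr ⟨half, hmemr, rfl⟩
    · refine List.mem_append_right _ (List.mem_filter.mpr ⟨?_, by simpa using hx2⟩)
      exact hx ▸ List.mem_map.mpr ⟨half, hmemr, rfl⟩

lemma genL_eq_palList (M J : Nat) (hJ : M < 10 ^ (2 * J)) : genL M J = palList M := by
  have h1 : (genL M J).Pairwise (· < ·) := pairwise_restL M 0 J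
  have h2 : (palList M).Pairwise (· < ·) := by
    have := List.pairwise_lt_range' (s := 1) (n := M) (step := 1)
    exact (by simpa using this : (List.range' 1 M).Pairwise (· < ·)).sublist List.filter_sublist
  have hmem : ∀ y, y ∈ genL M J ↔ y ∈ palList M := by
    intro y
    constructor
    · intro hy
      obtain ⟨hpal, hy1, hy2, _⟩ := restL_mem_facts (f := J) (j := 0) hy
      exact List.mem_filter.mpr ⟨List.mem_range'_1.mpr ⟨hy1, by omega⟩, hpal⟩
    · intro hy
      obtain ⟨hr, hpal⟩ := List.mem_filter.mp hy
      obtain ⟨hy1, hy2⟩ := List.mem_range'_1.mp hr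
      exact mem_genL_of_pal hy1 (by omega) hpal hJ
  exact List.Perm.eq_of_pairwise (fun a b _ _ hab hba => absurd (hab.trans hba) (lt_irrefl a)) h1 h2
    ((List.perm_ext_iff_of_nodup (h1.imp (fun hab => Nat.ne_of_lt hab)) (h2.imp (fun hab => Nat.ne_of_lt hab))).mpr hmem)

-- ---------- the loops of B ----------

-- B's inner loop, seen over the list of produced palindromes
def engB (kp : Int → Bool) (n m : Int) : List Int → Int → Int → Sum Int (Int × Int)
  | [], total, count => .inr (total, count)
  | p :: rest, total, count =>
      if p > m then .inr (total, count)
      else if kp p then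
        if count + 1 == n then .inl (total + p)
        else engB kp n m rest (total + p) (count + 1)
      else engB kp n m rest total count

lemma pvInnerB_eq_engB (k n m : Int) (odd : Bool) : ∀ (halves : List Int) (t c : Int),
    pvInnerB k n m odd halves t c =
      engB (fun p => pvBaseKPal p k) n m
        (halves.map (fun h => pvMirrorOnto (h.toNat + 1) h (if odd then PySem.Int.floordiv h 10 else h))) t c := by
  intro halves
  induction halves with
  | nil => intro t c; rfl
  | cons h rest ih =>
      intro t c
      simp only [pvInnerB, List.map_cons, engB, ih]

lemma engB_spec (kp : Int → Bool) (n m : Int) : ∀ (l : List Int) (t c : Int), c < n →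
    l.Pairwise (· ≤ ·) →
    engB kp n m l t c =
      (let g := (l.filter (fun p => decide (p ≤ m))).filter kp;
       if (g.length : Int) < n - c then Sum.inr (t + g.sum, c + g.length)
       else Sum.inl (t + (g.take (n - c).toNat).sum)) := by
  intro l
  induction l with
  | nil =>
      intro t c hc _
      simp only [engB, List.filter_nil, List.length_nil]
      rw [if_pos (by push_cast; omega)]
      simp
  | cons p rest ih =>
      intro t c hc hpw
      have hrestpw : rest.Pairwise (· ≤ ·) := hpw.of_cons
      by_cases hpm : p > m
      · have hfil : (p :: rest).filter (fun p => decide (p ≤ m)) = [] := by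
          rw [List.filter_eq_nil_iff]
          intro q hq
          rcases List.mem_cons.mp hq with rfl | hq
          · simp; omega
          · have := List.rel_of_pairwise_cons hpw hq
            simp; omega
        rw [engB, if_pos hpm, hfil]
        simp only [List.filter_nil, List.length_nil]
        rw [if_pos (by push_cast; omega)]
        simp
      · have hfil : (p :: rest).filter (fun p => decide (p ≤ m)) =
            p :: rest.filter (fun p => decide (p ≤ m)) := by
          rw [List.filter_cons_of_pos (by simp; omega)]
        rw [engB, if_neg hpm, hfil]
        by_cases hkp : kp p
        · rw [if_pos hkp, List.filter_cons_of_pos hkp]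
          by_cases heq : c + 1 = n
          · rw [if_pos (by simpa using heq)]
            have hn1 : n - c = 1 := by omega
            rw [hn1]
            rw [if_neg (by simp only [List.length_cons]; push_cast; omega)]
            simp
          · rw [if_neg (by simpa using heq), ih (t + p) (c + 1) (by omega) hrestpw]
            simp only []
            set g' := (rest.filter (fun p => decide (p ≤ m))).filter kp with hg'
            by_cases hlen : (g'.length : Int) < n - (c + 1)
            · rw [if_pos hlen, if_pos (by simp only [List.length_cons]; push_cast; omega)]
              simp only [List.sum_cons, List.length_cons, Sum.inr.injEq, Prod.mk.injEq]
              refine ⟨by ring, by push_cast; ring⟩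
            · rw [if_neg hlen, if_neg (by simp only [List.length_cons]; push_cast; omega)]
              have htn : (n - c).toNat = (n - (c + 1)).toNat + 1 := by omega
              rw [htn, List.take_succ_cons, List.sum_cons]
              congr 1
              ring
        · rw [if_neg hkp, List.filter_cons_of_neg hkp, ih t c hc hrestpw]

-- value of B's mirror helper on a Nat cast
lemma pvMirrorOnto_spec (f : Nat) : ∀ (num : Int) (y : Nat), y < f →
    pvMirrorOnto f num (y : Int) =
      num * 10 ^ (Nat.digits 10 y).length + (Nat.ofDigits 10 ((Nat.digits 10 y).reverse) : Nat) := by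
  induction f with
  | zero => intro num y h; omega
  | succ f ih =>
      intro num y hf
      rw [pvMirrorOnto]
      by_cases hy : (y : Int) > 0
      · rw [if_pos hy]
        have hy0 : 0 < y := by omega
        have hm : PySem.Int.mod (y : Int) 10 = ((y % 10 : Nat) : Int) := by
          rw [PySem.Int.mod_eq_emod_of_pos (by norm_num)]; omega
        have hd : PySem.Int.floordiv (y : Int) 10 = ((y / 10 : Nat) : Int) := by
          rw [PySem.Int.floordiv_eq_ediv_of_pos (by norm_num)]; omega
        rw [hm, hd, ih _ (y / 10) (by omega)]
        rw [Nat.digits_def' (b := 10) (by norm_num) hy0]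
        rw [List.reverse_cons, Nat.ofDigits_append]
        simp only [List.length_cons, List.length_reverse, Nat.ofDigits_singleton]
        push_cast
        ring
      · rw [if_neg hy]
        have : y = 0 := by omega
        subst this
        simp
  

lemma pvMirror_cast_O (h : Nat) :
    pvMirrorOnto (((h : Int)).toNat + 1) (h : Int) (PySem.Int.floordiv (h : Int) 10) = ((pmir h (h / 10) : Nat) : Int) := by
  have hd : PySem.Int.floordiv (h : Int) 10 = ((h / 10 : Nat) : Int) := by
    rw [PySem.Int.floordiv_eq_ediv_of_pos (by norm_num)]
    omega
  rw [hd, pvMirrorOnto_spec _ _ _ (by omega), pmir]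
  push_cast
  ring

lemma pvMirror_cast_E (h : Nat) :
    pvMirrorOnto (((h : Int)).toNat + 1) (h : Int) (h : Int) = ((pmir h h : Nat) : Int) := by
  rw [pvMirrorOnto_spec _ _ _ (by omega), pmir]
  push_cast
  ring

-- pyRange(lo, 10*lo) for lo = 10^j is the cast of range'
lemma pyRange_block (j : Nat) :
    PySem.List.pyRange ((10 ^ j : Nat) : Int) (10 * ((10 ^ j : Nat) : Int)) 1 =
      (List.range' (10 ^ j) (9 * 10 ^ j)).map (fun h : Nat => (h : Int)) := by
  have hlen : ((10 * ((10 ^ j : Nat) : Int) - ((10 ^ j : Nat) : Int))).toNat = 9 * 10 ^ j := by omega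
  apply List.ext_getElem
  · rw [PySem.List.length_pyRange_one, List.length_map, List.length_range', hlen]
  · intro i h1 h2
    rw [PySem.List.getElem_pyRange_one, List.getElem_map, List.getElem_range']
    push_cast
    ring

lemma map_cast_filter_le (m : Int) (hm : 0 ≤ m) (l : List Nat) :
    (l.map (fun x : Nat => (x : Int))).filter (fun p => decide (p ≤ m)) =
      (cutL m.toNat l).map (fun x : Nat => (x : Int)) := by
  rw [List.filter_map, cutL]
  congr 1
  apply List.filter_congr
  intro h _
  simp only [Function.comp_apply, decide_eq_decide]
  exact (Int.le_toNat hm).symm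

lemma pairwise_le_cast (l : List Nat) (h : l.Pairwise (· < ·)) :
    (l.map (fun x : Nat => (x : Int))).Pairwise (· ≤ ·) := by
  rw [List.pairwise_map]
  exact h.imp (fun hab => by exact_mod_cast Nat.le_of_lt hab)

lemma inner_block_O (k n m : Int) (j : Nat) (t c : Int) :
    pvInnerB k n m true (PySem.List.pyRange ((10 ^ j : Nat) : Int) (10 * ((10 ^ j : Nat) : Int)) 1) t c =
      engB (fun p => pvBaseKPal p k) n m ((blockO j).map (fun x : Nat => (x : Int))) t c := by
  rw [pyRange_block, pvInnerB_eq_engB, List.map_map, blockO, List.map_map]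
  congr 1
  apply List.map_congr_left
  intro h _
  simp only [Function.comp_apply, if_true]
  exact pvMirror_cast_O h

lemma inner_block_E (k n m : Int) (j : Nat) (t c : Int) :
    pvInnerB k n m false (PySem.List.pyRange ((10 ^ j : Nat) : Int) (10 * ((10 ^ j : Nat) : Int)) 1) t c =
      engB (fun p => pvBaseKPal p k) n m ((blockE j).map (fun x : Nat => (x : Int))) t c := by
  rw [pyRange_block, pvInnerB_eq_engB, List.map_map, blockE, List.map_map]
  congr 1
  apply List.map_congr_left
  intro h _
  simp only [Function.comp_apply, if_false, Bool.false_eq_true]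
  exact pvMirror_cast_E h

-- outer loop spec
lemma pvOuterB_spec (k n m : Int) (hm : 0 < m) : ∀ (f j : Nat) (t c : Int), c < n →
    m.toNat < 10 ^ (2 * (j + f)) →
    pvOuterB k n m f ((10 ^ j : Nat) : Int) t c =
      t + (((((restL m.toNat j f).map (fun x : Nat => (x : Int)))).filter (fun p => pvBaseKPal p k)).take
            (n - c).toNat).sum := by
  intro f
  induction f with
  | zero =>
      intro j t c hc hpow
      rw [pvOuterB]
      simp [restL]
  | succ f ih =>
      intro j t c hc hpow
      rw [pvOuterB]
      by_cases hlo : ((10 ^ j : Nat) : Int) * ((10 ^ j : Nat) : Int) ≤ m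
      · rw [if_pos hlo, inner_block_O k n m j t c,
          engB_spec _ _ _ _ _ _ hc (pairwise_le_cast _ (pairwise_blockO j))]
        simp only [map_cast_filter_le m (le_of_lt hm)]
        set AO := ((cutL m.toNat (blockO j)).map (fun x : Nat => (x : Int))).filter (fun p => pvBaseKPal p k) with hAO
        set AE := ((cutL m.toNat (blockE j)).map (fun x : Nat => (x : Int))).filter (fun p => pvBaseKPal p k) with hAE
        set RR := ((restL m.toNat (j + 1) f).map (fun x : Nat => (x : Int))).filter (fun p => pvBaseKPal p k) with hRR
        have hsplit : ((restL m.toNat j (f + 1)).map (fun x : Nat => (x : Int))).filter (fun p => pvBaseKPal p k) = (AO ++ AE) ++ RR := by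
          rw [restL_succ, List.map_append, List.map_append, List.filter_append, List.filter_append, hAO, hAE, hRR]
        rw [hsplit]
        by_cases hlenO : ((AO.length : Int) < n - c)
        · rw [if_pos hlenO]
          have hc1 : c + (AO.length : Int) < n := by omega
          dsimp only
          rw [inner_block_E k n m j, engB_spec _ _ _ _ _ _ hc1 (pairwise_le_cast _ (pairwise_blockE j))]
          simp only [map_cast_filter_le m (le_of_lt hm)]
          rw [← hAE]
          by_cases hlenE : ((AE.length : Int) < n - (c + (AO.length : Int)))
          · rw [if_pos hlenE]
            dsimp only
            have hlo10 : (10 : Int) * ((10 ^ j : Nat) : Int) = ((10 ^ (j + 1) : Nat) : Int) := by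
              push_cast
              ring
            rw [hlo10, ih (j + 1) _ _ (by omega) (by rw [show j + 1 + f = j + (f + 1) by ring]; exact hpow)]
            rw [← hRR]
            have htake : ((AO ++ AE) ++ RR).take (n - c).toNat =
                (AO ++ AE) ++ RR.take ((n - (c + (AO.length : Int) + (AE.length : Int))).toNat) := by
              rw [List.take_append, List.take_of_length_le (by simp; omega)]
              congr 2
              simp only [List.length_append]
              omega
            rw [htake]
            simp only [List.sum_append]
            ring
          · rw [if_neg hlenE]
            dsimp only
            have htake : ((AO ++ AE) ++ RR).take (n - c).toNat =
                AO ++ AE.take ((n - (c + (AO.length : Int))).toNat) := by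
              rw [List.take_append, List.take_append]
              have h1 : (n - c).toNat - (AO ++ AE).length = 0 := by
                simp only [List.length_append]
                omega
              have h2 : AO.take (n - c).toNat = AO := List.take_of_length_le (by omega)
              have h3 : (n - c).toNat - AO.length = (n - (c + (AO.length : Int))).toNat := by omega
              rw [h1, h2, h3, List.take_zero, List.append_nil]
            rw [htake]
            simp only [List.sum_append]
            ring
        · rw [if_neg hlenO]
          dsimp only
          have htake : ((AO ++ AE) ++ RR).take (n - c).toNat = AO.take (n - c).toNat := by
            rw [List.take_append, List.take_append]
            have h1 : (n - c).toNat - (AO ++ AE).length = 0 := by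
              simp only [List.length_append]
              omega
            have h2 : (n - c).toNat - AO.length = 0 := by omega
            rw [h1, h2, List.take_zero, List.take_zero, List.append_nil, List.append_nil]
          rw [htake]
      · rw [if_neg hlo]
        have hempty : restL m.toNat j (f + 1) = [] := by
          rw [List.eq_nil_iff_forall_not_mem]
          intro x hx
          obtain ⟨_, _, hxM, hxge⟩ := restL_mem_facts hx
          have hcast : ((10 ^ j : Nat) : Int) * ((10 ^ j : Nat) : Int) = ((10 ^ (2 * j) : Nat) : Int) := by
            push_cast
            rw [two_mul, pow_add]
          rw [hcast] at hlo
          have : m.toNat < 10 ^ (2 * j) := by omega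
          omega
        rw [hempty]
        simp

-- ---------- assembly ----------

lemma filter_chain (k m : Int) (hm : 0 ≤ m) :
    (PySem.List.pyRange 1 (m + 1) 1).filter (fun x => pvIsKMirror x k) =
      ((palList m.toNat).map (fun x : Nat => (x : Int))).filter (fun p => pvBaseKPal p k) := by
  have h1 : PySem.List.pyRange 1 (m + 1) 1 = (List.range' 1 m.toNat).map (fun x : Nat => (x : Int)) := by
    apply List.ext_getElem
    · rw [PySem.List.length_pyRange_one, List.length_map, List.length_range']
      omega
    · intro i hi1 hi2
      rw [PySem.List.getElem_pyRange_one, List.getElem_map, List.getElem_range']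
      push_cast
      ring
  rw [h1, List.filter_map, List.filter_map]
  refine congrArg (List.map (fun x : Nat => (x : Int))) ?_
  rw [palList, List.filter_filter]
  apply List.filter_congr
  intro h hmem
  have hh1 : 1 ≤ h := (List.mem_range'_1.mp hmem).1
  simp only [Function.comp_apply]
  rw [pvIsKMirror_split, pvIsPal10_eq _ (by exact_mod_cast hh1), Int.toNat_natCast]
  exact Bool.and_comm _ _

-- ===== VERDICT (by name: the statement is the Claim_ definition above) =====
theorem sum_of_k_mirror_numbers_spec : Claim_equal_sum_of_k_mirror_numbers := by
  intro k n m _ hpre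
  unfold Spec_sum_of_k_mirror_numbers sum_of_k_mirror_numbers sum_of_k_mirror_numbers_alt
  rw [pvLoopA_eq k n m _ 1 0 0 (by omega)]
  rcases hpre with ⟨_hk0, _hk1⟩ | hn | hm
  · -- k ∉ {0, 1}: the general argument, by the sign cases of n and m
    by_cases hn : n ≤ 0
    · rw [if_pos hn]
      have h0 : (n - 0).toNat = 0 := by omega
      rw [h0]
      simp
    · rw [if_neg hn]
      by_cases hm : m ≤ 0
      · rw [pyRangeNil 1 (m + 1) (by omega)]
        show _ = pvOuterB k n m (m.toNat + 1 + 1) 1 0 0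
        rw [pvOuterB, if_neg (by omega)]
        simp
      · have hm1 : 0 < m := by omega
        have hn1 : 0 < n := by omega
        have hcond : m.toNat < 10 ^ (2 * (0 + (m.toNat + 2))) := by
          calc m.toNat < 10 ^ m.toNat := Nat.lt_pow_self (by norm_num)
            _ ≤ _ := Nat.pow_le_pow_right (by norm_num) (by omega)
        have h10 : (1 : Int) = ((10 ^ 0 : Nat) : Int) := by norm_num
        rw [filter_chain k m (le_of_lt hm1), h10,
          pvOuterB_spec k n m hm1 (m.toNat + 2) 0 0 0 hn1 hcond]
        rw [show restL m.toNat 0 (m.toNat + 2) = genL m.toNat (m.toNat + 2) from rfl,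
          genL_eq_palList _ _ (by simpa using hcond)]
  · -- n ≤ 0: both sides are 0
    rw [if_pos hn]
    have h0 : (n - 0).toNat = 0 := by omega
    rw [h0]
    simp
  · -- m ≤ 0: the scanned range and the generated blocks are both empty
    by_cases hn : n ≤ 0
    · rw [if_pos hn]
      have h0 : (n - 0).toNat = 0 := by omega
      rw [h0]
      simp
    · rw [if_neg hn, pyRangeNil 1 (m + 1) (by omega)]
      show _ = pvOuterB k n m (m.toNat + 1 + 1) 1 0 0
      rw [pvOuterB, if_neg (by omega)]
      simp
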